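-- pv_equiv track=rewrite | github.com/TheRedEG/addinf | nc.py | nbColumns
-- ===== SOURCE A (Python) =====
-- def nbColumns(line, maxLimit = None):
--     count = 0
--     i = 0
--     for c in line:
--         if maxLimit != None and i >= maxLimit:
--             return count
--         if c == '\t':
--             count = count - (count % 8) + 8
--         elif c == '\n':
--             return count
--         else:
--             count = count + 1
--         i = i + 1
--
--     return count
-- ===== SOURCE B (Python) =====
-- def nbColumns(line, maxLimit=None):
--     # Phase 1: stop boundary — clamp to the maxLimit window, cut at the first newline.
--     window = line if maxLimit is None else line[:max(maxLimit, 0)]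
--     nl = window.find('\n')
--     if nl >= 0:
--         window = window[:nl]
--     # Phase 2: jump from tab to tab; each tab-free segment is measured by its length
--     # at once, each tab rounds the column up to the next multiple of 8.
--     count = 0
--     while True:
--         j = window.find('\t')
--         if j < 0:
--             return count + len(window)
--         count = (count + j) // 8 * 8 + 8
--         window = window[j + 1:]
-- ===== Notes on version B (the rewrite author's own statement) =====
-- stated objective: faster
-- what changed: Replaced A's fused per-character loop (index cap, newline test and tab arithmetic all in one loop body) by a staged algorithm: first locate the stop boundary (maxLimit window, then cut at the first newline via find/slicing), then measure columns by jumping from tab to tab with str.find, adding each tab-free segment's length in one arithmetic step and rounding up at each tab.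
import Mathlib
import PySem

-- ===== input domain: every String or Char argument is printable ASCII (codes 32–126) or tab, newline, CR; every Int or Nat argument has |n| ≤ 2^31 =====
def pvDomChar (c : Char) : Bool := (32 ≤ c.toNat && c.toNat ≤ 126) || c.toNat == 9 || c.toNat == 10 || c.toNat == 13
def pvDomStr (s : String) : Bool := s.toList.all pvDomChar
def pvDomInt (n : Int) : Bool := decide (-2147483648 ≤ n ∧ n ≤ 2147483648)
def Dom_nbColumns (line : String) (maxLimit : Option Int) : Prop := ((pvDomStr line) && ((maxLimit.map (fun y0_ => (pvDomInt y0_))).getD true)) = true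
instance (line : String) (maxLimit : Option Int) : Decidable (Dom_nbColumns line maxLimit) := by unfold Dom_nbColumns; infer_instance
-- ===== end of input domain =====

-- B stages the work: locate the stop boundary (maxLimit window, first newline), then measure columns by jumping from tab to tab, adding segment lengths wholesale; measured faster (constant factor: C-speed find/slicing instead of a per-character Python loop).

-- ===== PORT A =====
-- the for-loop of A, with its accumulator `count` and index `i`
def nbColumnsGo (maxLimit : Option Int) : List Char → Int → Int → Int
  | [], count, _ => count
  | c :: rest, count, i =>
    if (match maxLimit with | some m => decide (i ≥ m) | none => false) = true then count
    else if c = '\t' then nbColumnsGo maxLimit rest (count - PySem.Int.mod count 8 + 8) (i + 1)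
    else if c = '\n' then count
    else nbColumnsGo maxLimit rest (count + 1) (i + 1)

def nbColumns (line : String) (maxLimit : Option Int) : Int :=
  nbColumnsGo maxLimit line.toList 0 0

-- ===== PORT B =====
-- termination fact for B's while-loop: the found tab index lies inside the list
lemma findTab_toNat_lt (cs : List Char) (h : 0 ≤ PySem.Chars.find cs ['\t']) :
    (PySem.Chars.find cs ['\t']).toNat < cs.length := by
  obtain ⟨hpre, -⟩ := PySem.Chars.find_spec (s := cs) (sub := ['\t']) h
  obtain ⟨t, ht⟩ := hpre
  have hd : cs.drop (PySem.Chars.find cs ['\t']).toNat = '\t' :: t := ht ▸ rfl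
  by_contra hle
  rw [List.drop_eq_nil_of_le (by omega)] at hd
  simp at hd

-- Source B's while-loop: find the next tab, add the segment, round up, drop it
def altGo (cs : List Char) (count : Int) : Int :=
  if PySem.Chars.find cs ['\t'] < 0 then count + cs.length
  else altGo (PySem.List.slice cs (some (PySem.Chars.find cs ['\t'] + 1)) none)
             (PySem.Int.floordiv (count + PySem.Chars.find cs ['\t']) 8 * 8 + 8)
termination_by cs.length
decreasing_by
  have h0 : 0 ≤ PySem.Chars.find cs ['\t'] := by omega
  have := findTab_toNat_lt cs h0
  rw [PySem.List.slice_from cs (by omega : (0:Int) ≤ PySem.Chars.find cs ['\t'] + 1)]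
  simp only [List.length_drop]
  omega

def nbColumns_alt (line : String) (maxLimit : Option Int) : Int :=
  let window₀ := match maxLimit with
    | none => line.toList
    | some m => PySem.List.slice line.toList none (some (max m 0))
  let nl := PySem.Chars.find window₀ ['\n']
  let window := if 0 ≤ nl then PySem.List.slice window₀ none (some nl) else window₀
  altGo window 0

-- ===== PRECONDITION & SPEC =====
def Spec_nbColumns (line : String) (maxLimit : Option Int) (out : Int) : Prop := out = nbColumns_alt line maxLimit
instance (line : String) (maxLimit : Option Int) (out : Int) : Decidable (Spec_nbColumns line maxLimit out) := by unfold Spec_nbColumns; infer_instance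

-- ===== CLAIM (what is proved, stated in full; the proofs are below) =====
def Claim_equal_nbColumns : Prop := ∀ (line : String) (maxLimit : Option Int), Dom_nbColumns line maxLimit → Spec_nbColumns line maxLimit (nbColumns line maxLimit)

-- ===== LEMMAS AND PROOFS =====

-- proof-side single-character width step (reference semantics shared by both proofs)
def altStep (count : Int) (c : Char) : Int :=
  if c = '\t' then count - PySem.Int.mod count 8 + 8 else count + 1

-- the find-and-cut of B equals takeWhile (· != a)
lemma takeWhile_eq_take_of_first {a : Char} : ∀ (cs : List Char) (k : Nat),
    cs[k]? = some a → (∀ i, i < k → cs[i]? ≠ some a) →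
    cs.takeWhile (· != a) = cs.take k := by
  intro cs
  induction cs with
  | nil => intro k h _; simp at h
  | cons c rest ih =>
    intro k hk hmin
    cases k with
    | zero =>
      simp at hk
      subst hk
      simp [List.takeWhile]
    | succ j =>
      have hc : c ≠ a := by
        intro h; exact hmin 0 (Nat.succ_pos j) (by simp [h])
      simp only [List.takeWhile_cons, List.take_succ_cons]
      rw [if_pos (by simp [hc])]
      congr 1
      exact ih j (by simpa using hk) (by
        intro i hi h
        exact hmin (i+1) (by omega) (by simpa using h))

lemma cut_eq_takeWhile (ws : List Char) :
    (if 0 ≤ PySem.Chars.find ws ['\n'] then PySem.List.slice ws none (some (PySem.Chars.find ws ['\n'])) else ws)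
      = ws.takeWhile (· != '\n') := by
  by_cases h : 0 ≤ PySem.Chars.find ws ['\n']
  · rw [if_pos h, PySem.List.slice_to ws h]
    obtain ⟨hpre, hmin⟩ := PySem.Chars.find_spec (s := ws) (sub := ['\n']) h
    symm
    apply takeWhile_eq_take_of_first
    · obtain ⟨t, ht⟩ := hpre
      have : ws.drop (PySem.Chars.find ws ['\n']).toNat = '\n' :: t := ht ▸ rfl
      have := congrArg List.head? this
      simpa [List.head?_drop] using this
    · intro i hi hcontra
      apply hmin i hi
      refine ⟨(ws.drop i).tail, ?_⟩
      have : (ws.drop i).head? = some '\n' := by simpa [List.head?_drop] using hcontra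
      cases hd : ws.drop i with
      | nil => simp [hd] at this
      | cons x t => simp [hd] at this ⊢; simp [this]
  · rw [if_neg h]
    have hne : ¬ ['\n'] <:+: ws := by
      rw [← PySem.Chars.find_nonneg_iff]; exact h
    have hnm : '\n' ∉ ws := by
      intro hm
      obtain ⟨s, t, hst⟩ := List.append_of_mem hm
      exact hne ⟨s, t, by simp [hst]⟩
    symm
    rw [List.takeWhile_eq_self_iff]
    intro x hx
    simp only [bne_iff_ne, ne_eq]
    intro hx'; exact hnm (hx' ▸ hx)

-- A's loop without a limit folds the width step over the pre-newline prefix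
lemma goNone : ∀ (cs : List Char) (count i : Int),
    nbColumnsGo none cs count i = (cs.takeWhile (· != '\n')).foldl altStep count := by
  intro cs
  induction cs with
  | nil => intro count i; simp [nbColumnsGo]
  | cons c rest ih =>
    intro count i
    by_cases ht : c = '\t'
    · subst ht
      simp [nbColumnsGo, altStep, ih]
    · by_cases hn : c = '\n'
      · subst hn; simp [nbColumnsGo]
      · simp [nbColumnsGo, ht, hn, altStep, ih]

-- A's loop with limit m folds the width step over the pre-newline prefix of the remaining window
lemma goSome : ∀ (cs : List Char) (count i m : Int),
    nbColumnsGo (some m) cs count i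
      = ((cs.take (m - i).toNat).takeWhile (· != '\n')).foldl altStep count := by
  intro cs
  induction cs with
  | nil => intro count i m; simp [nbColumnsGo]
  | cons c rest ih =>
    intro count i m
    by_cases hlim : i ≥ m
    · have : (m - i).toNat = 0 := by omega
      simp [nbColumnsGo, hlim, this]
    · have hpos : (m - i).toNat = (m - (i+1)).toNat + 1 := by omega
      rw [hpos]
      by_cases ht : c = '\t'
      · subst ht
        simp [nbColumnsGo, hlim, altStep, ih]
      · by_cases hn : c = '\n'
        · subst hn; simp [nbColumnsGo, hlim]
        · simp [nbColumnsGo, hlim, ht, hn, altStep, ih]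

-- a tab-free list contributes its length
lemma foldl_no_tab : ∀ (cs : List Char), '\t' ∉ cs → ∀ count : Int,
    cs.foldl altStep count = count + cs.length := by
  intro cs
  induction cs with
  | nil => intro _ count; simp
  | cons c rest ih =>
    intro hnm count
    have hc : c ≠ '\t' := fun h => hnm (h ▸ List.mem_cons_self ..)
    have hr : '\t' ∉ rest := fun h => hnm (List.mem_cons_of_mem _ h)
    simp only [List.foldl_cons, altStep, if_neg (by simp [hc] : ¬ c = '\t')]
    rw [ih hr]
    simp
    omega

-- B's tab-jumping loop computes the same fold as the per-character width step
lemma altGo_eq_foldl : ∀ (n : Nat) (cs : List Char), cs.length ≤ n → ∀ count : Int,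
    altGo cs count = cs.foldl altStep count := by
  intro n
  induction n with
  | zero =>
    intro cs hlen count
    have hnil : cs = [] := List.eq_nil_of_length_eq_zero (by omega)
    subst hnil
    have hf : PySem.Chars.find ([] : List Char) ['\t'] = -1 := by
      rw [PySem.Chars.find_eq_neg_one_iff]; simp
    rw [altGo, if_pos (by rw [hf]; norm_num)]
    simp
  | succ n ih =>
    intro cs hlen count
    by_cases h : PySem.Chars.find cs ['\t'] < 0
    · rw [altGo, if_pos h]
      have hne : ¬ ['\t'] <:+: cs := by
        rw [← PySem.Chars.find_nonneg_iff]; omega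
      have hnm : '\t' ∉ cs := by
        intro hm
        obtain ⟨s, t, hst⟩ := List.append_of_mem hm
        exact hne ⟨s, t, by simp [hst]⟩
      rw [foldl_no_tab cs hnm]
    · rw [altGo, if_neg (by omega : ¬ PySem.Chars.find cs ['\t'] < 0)]
      have h0 : 0 ≤ PySem.Chars.find cs ['\t'] := by omega
      set j := PySem.Chars.find cs ['\t'] with hj
      obtain ⟨hpre, hmin⟩ := PySem.Chars.find_spec (s := cs) (sub := ['\t']) h0
      obtain ⟨t, ht⟩ := hpre
      have hd : cs.drop j.toNat = '\t' :: t := ht ▸ rfl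
      have hjlt : j.toNat < cs.length := findTab_toNat_lt cs h0
      -- cs = take j ++ '\t' :: drop (j+1)
      have hdecomp : cs = cs.take j.toNat ++ '\t' :: t := by
        conv_lhs => rw [← List.take_append_drop j.toNat cs]
        rw [hd]
      have hslice : PySem.List.slice cs (some (j + 1)) none = t := by
        rw [PySem.List.slice_from cs (by omega : (0:Int) ≤ j + 1)]
        have : (j + 1).toNat = j.toNat + 1 := by omega
        rw [this, ← List.drop_drop, hd]
        rfl
      have hnotab : '\t' ∉ cs.take j.toNat := by
        intro hm
        obtain ⟨i, hi, hget⟩ := List.getElem_of_mem hm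
        have hil : i < j.toNat := by
          have := List.length_take_le j.toNat cs; omega
        apply hmin i hil
        refine ⟨(cs.drop i).tail, ?_⟩
        have hgete : cs[i]? = some '\t' := by
          have h1 : (cs.take j.toNat)[i]? = some '\t' := by
            rw [List.getElem?_eq_getElem hi, hget]
          rwa [List.getElem?_take_of_lt hil] at h1
        have hh : (cs.drop i).head? = some '\t' := by
          rw [List.head?_drop]; exact hgete
        cases hdd : cs.drop i with
        | nil => simp [hdd] at hh
        | cons x xs => simp [hdd] at hh ⊢; simp [hh]
      have htake_len : (cs.take j.toNat).length = j.toNat := by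
        simp; omega
      have htlen : t.length ≤ n := by
        have := congrArg List.length hdecomp
        simp [htake_len] at this
        omega
      rw [hslice, ih t htlen]
      conv_rhs => rw [hdecomp]
      rw [List.foldl_append, foldl_no_tab _ hnotab, htake_len]
      simp only [List.foldl_cons]
      congr 1
      have hdm := PySem.Int.floordiv_mul_add_mod (count + j) 8
      simp [altStep]
      omega

-- ===== VERDICT (by name: the statement is the Claim_ definition above) =====
theorem nbColumns_spec : Claim_equal_nbColumns := by
  intro line maxLimit _
  unfold Spec_nbColumns nbColumns nbColumns_alt
  cases maxLimit with
  | none =>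
    simp only
    rw [cut_eq_takeWhile, goNone, altGo_eq_foldl _ _ (le_refl _)]
  | some m =>
    simp only
    rw [cut_eq_takeWhile, goSome, altGo_eq_foldl _ _ (le_refl _)]
    congr 2
    rw [PySem.List.slice_to line.toList (by omega : (0:Int) ≤ max m 0)]
    congr 1
    omega
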